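-- pv_equiv track=rewrite | github.com/trendiguru/core | db_stuff/amazon/amazon_worker.py | verify_by_title
-- ===== SOURCE A (Python) =====
-- pants = ['PANTS', 'PANT', 'TROUSERS', 'TROUSER', 'CULOTTE', 'CULOTTES', 'CHINO', 'CHINOS', 'CAPRI', 'CAPRIS', 'SLACKS',
--          'PONTE']
--
-- big_no_no = ['PANTIES', 'BRIEFS', 'UNDERPANTS', 'UNDERWEAR', 'BOXER', 'PANTIE', 'BRIEF', 'CUFFLINK', 'STUDS',
--              'KILT', 'STRAP']
--
-- def verify_by_title(title):
--     title_upper = title.upper()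
--     if any(x in title_upper for x in big_no_no):
--         return ''
--     if any(x in title_upper for x in ['BLAZER', 'BLAZERS']):
--         return 'blazer'
--     if any(x in title_upper for x in ['STOCKING', 'STOCKINGS']):
--         return 'stockings'
--     elif any(x in title_upper for x in pants):
--         if any(x in title_upper for x in ['SHORTS','SHORT']):
--             return 'shorts'
--         return 'pants'
--     elif any(x in title_upper for x in ['DRESS', 'DRESSES', 'MAXI', 'GOWN']):
--         return 'dress'
--     elif any(x in title_upper for x in ['SHIRT', 'SHIRTS']):
--         return 'shirt'
--     elif any(x in title_upper for x in ['SUIT', 'TOXEDO']):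
--         return 'suit'
--     elif any(x in title_upper for x in ['SWEATSHIRT', 'SWEATSHIRTS']):
--         return 'sweatshirt'
--     elif any(x in title_upper for x in ['SWEATER', 'SWEATERS']):
--         return 'sweater'
--     elif 'SHORTS' in title_upper:
--         return 'shorts'
--     elif any(x in title_upper for x in ['T-SHIRT', 'T-SHIRTS']):
--         return 't-shirt'
--     elif any(x in title_upper for x in ['SKIRT', 'SKIRTS', 'SKORT', 'SKORTS', 'MINI']):
--         return 'skirt'
--     elif any(x in title_upper for x in ['COAT', 'FAUX', 'COATS', 'OUTWEAR', 'PARKA', 'PARKAS']):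
--         return 'coat'
--     elif any(x in title_upper for x in ['JACKET', 'JACKETS']):
--         return 'jacket'
--     elif 'TIGHTS' in title_upper:
--         return 'tights'
--     elif any(x in title_upper for x in ['TOP', 'TOPS']):
--         return 'top'
--     elif 'JEANS' in title_upper:
--         return 'jeans'
--     else:
--         return ''
-- ===== SOURCE B (Python) =====
-- # B: instead of an if/elif ladder with short-circuit, flatten all patterns into one
-- # pattern->priority dict, collect every matching priority, and pick the minimum;
-- # the pants/shorts sub-rule becomes a single post-adjustment.
--
-- RULES = [
--     (['PANTIES', 'BRIEFS', 'UNDERPANTS', 'UNDERWEAR', 'BOXER', 'PANTIE', 'BRIEF',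
--       'CUFFLINK', 'STUDS', 'KILT', 'STRAP'], ''),
--     (['BLAZER', 'BLAZERS'], 'blazer'),
--     (['STOCKING', 'STOCKINGS'], 'stockings'),
--     (['PANTS', 'PANT', 'TROUSERS', 'TROUSER', 'CULOTTE', 'CULOTTES', 'CHINO', 'CHINOS',
--       'CAPRI', 'CAPRIS', 'SLACKS', 'PONTE'], 'pants'),
--     (['DRESS', 'DRESSES', 'MAXI', 'GOWN'], 'dress'),
--     (['SHIRT', 'SHIRTS'], 'shirt'),
--     (['SUIT', 'TOXEDO'], 'suit'),
--     (['SWEATSHIRT', 'SWEATSHIRTS'], 'sweatshirt'),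
--     (['SWEATER', 'SWEATERS'], 'sweater'),
--     (['SHORTS'], 'shorts'),
--     (['T-SHIRT', 'T-SHIRTS'], 't-shirt'),
--     (['SKIRT', 'SKIRTS', 'SKORT', 'SKORTS', 'MINI'], 'skirt'),
--     (['COAT', 'FAUX', 'COATS', 'OUTWEAR', 'PARKA', 'PARKAS'], 'coat'),
--     (['JACKET', 'JACKETS'], 'jacket'),
--     (['TIGHTS'], 'tights'),
--     (['TOP', 'TOPS'], 'top'),
--     (['JEANS'], 'jeans'),
-- ]
--
-- PATTERN_PRI = {p: i for i, (ps, _) in enumerate(RULES) for p in ps}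
--
-- def verify_by_title(title):
--     tu = title.upper()
--     hits = [i for p, i in PATTERN_PRI.items() if p in tu]
--     if not hits:
--         return ''
--     label = RULES[min(hits)][1]
--     if label == 'pants' and ('SHORTS' in tu or 'SHORT' in tu):
--         return 'shorts'
--     return label
-- ===== Notes on version B (the rewrite author's own statement) =====
-- stated objective: alternative
-- what changed: Instead of an ordered if/elif ladder with short-circuit first-match, B flattens every keyword into a single pattern->priority dict, collects all matching priorities, indexes the rule table with the minimum, and handles the pants/shorts sub-rule as one post-adjustment.
import Mathlib
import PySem

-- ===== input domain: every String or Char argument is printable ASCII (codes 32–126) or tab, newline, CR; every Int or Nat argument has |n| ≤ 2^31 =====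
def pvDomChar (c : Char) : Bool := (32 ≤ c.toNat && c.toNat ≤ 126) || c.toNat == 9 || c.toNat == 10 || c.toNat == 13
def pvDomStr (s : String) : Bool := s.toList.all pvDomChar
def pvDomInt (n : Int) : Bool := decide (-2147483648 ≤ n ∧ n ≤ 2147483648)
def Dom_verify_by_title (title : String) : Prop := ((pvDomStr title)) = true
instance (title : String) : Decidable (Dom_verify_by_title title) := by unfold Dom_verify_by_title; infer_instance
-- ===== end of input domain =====

-- B replaces A's if/elif ladder by a min-priority selection over a flat pattern→priority
-- table (collect all matching priorities, take the minimum, one post-adjustment); simpler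
-- decomposition, same result.

-- ===== PORT A =====
def pants_A : List String := ["PANTS", "PANT", "TROUSERS", "TROUSER", "CULOTTE", "CULOTTES", "CHINO", "CHINOS", "CAPRI", "CAPRIS", "SLACKS", "PONTE"]

def big_no_no_A : List String := ["PANTIES", "BRIEFS", "UNDERPANTS", "UNDERWEAR", "BOXER", "PANTIE", "BRIEF", "CUFFLINK", "STUDS", "KILT", "STRAP"]

def verify_by_title (title : String) : String :=
  let tu := PySem.Str.upper title
  if big_no_no_A.any (fun x => PySem.Str.isIn x tu) then ""
  else if (["BLAZER", "BLAZERS"] : List String).any (fun x => PySem.Str.isIn x tu) then "blazer"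
  else if (["STOCKING", "STOCKINGS"] : List String).any (fun x => PySem.Str.isIn x tu) then "stockings"
  else if pants_A.any (fun x => PySem.Str.isIn x tu) then
    (if (["SHORTS", "SHORT"] : List String).any (fun x => PySem.Str.isIn x tu) then "shorts" else "pants")
  else if (["DRESS", "DRESSES", "MAXI", "GOWN"] : List String).any (fun x => PySem.Str.isIn x tu) then "dress"
  else if (["SHIRT", "SHIRTS"] : List String).any (fun x => PySem.Str.isIn x tu) then "shirt"
  else if (["SUIT", "TOXEDO"] : List String).any (fun x => PySem.Str.isIn x tu) then "suit"
  else if (["SWEATSHIRT", "SWEATSHIRTS"] : List String).any (fun x => PySem.Str.isIn x tu) then "sweatshirt"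
  else if (["SWEATER", "SWEATERS"] : List String).any (fun x => PySem.Str.isIn x tu) then "sweater"
  else if PySem.Str.isIn "SHORTS" tu then "shorts"
  else if (["T-SHIRT", "T-SHIRTS"] : List String).any (fun x => PySem.Str.isIn x tu) then "t-shirt"
  else if (["SKIRT", "SKIRTS", "SKORT", "SKORTS", "MINI"] : List String).any (fun x => PySem.Str.isIn x tu) then "skirt"
  else if (["COAT", "FAUX", "COATS", "OUTWEAR", "PARKA", "PARKAS"] : List String).any (fun x => PySem.Str.isIn x tu) then "coat"
  else if (["JACKET", "JACKETS"] : List String).any (fun x => PySem.Str.isIn x tu) then "jacket"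
  else if PySem.Str.isIn "TIGHTS" tu then "tights"
  else if (["TOP", "TOPS"] : List String).any (fun x => PySem.Str.isIn x tu) then "top"
  else if PySem.Str.isIn "JEANS" tu then "jeans"
  else ""

-- ===== PORT B =====
def pvRulesB : List (List String × String) :=
  [ (["PANTIES", "BRIEFS", "UNDERPANTS", "UNDERWEAR", "BOXER", "PANTIE", "BRIEF", "CUFFLINK", "STUDS", "KILT", "STRAP"], ""),
    (["BLAZER", "BLAZERS"], "blazer"),
    (["STOCKING", "STOCKINGS"], "stockings"),
    (["PANTS", "PANT", "TROUSERS", "TROUSER", "CULOTTE", "CULOTTES", "CHINO", "CHINOS", "CAPRI", "CAPRIS", "SLACKS", "PONTE"], "pants"),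
    (["DRESS", "DRESSES", "MAXI", "GOWN"], "dress"),
    (["SHIRT", "SHIRTS"], "shirt"),
    (["SUIT", "TOXEDO"], "suit"),
    (["SWEATSHIRT", "SWEATSHIRTS"], "sweatshirt"),
    (["SWEATER", "SWEATERS"], "sweater"),
    (["SHORTS"], "shorts"),
    (["T-SHIRT", "T-SHIRTS"], "t-shirt"),
    (["SKIRT", "SKIRTS", "SKORT", "SKORTS", "MINI"], "skirt"),
    (["COAT", "FAUX", "COATS", "OUTWEAR", "PARKA", "PARKAS"], "coat"),
    (["JACKET", "JACKETS"], "jacket"),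
    (["TIGHTS"], "tights"),
    (["TOP", "TOPS"], "top"),
    (["JEANS"], "jeans") ]

-- PATTERN_PRI = {p: i for i, (ps, _) in enumerate(RULES) for p in ps}
-- all pattern keys are distinct, so the dict equals this association list in insertion order
def pvPatternPri : List (String × Int) :=
  (PySem.List.enumerate pvRulesB 0).flatMap (fun ir => ir.2.1.map (fun p => (p, ir.1)))

def verify_by_title_alt (title : String) : String :=
  let tu := PySem.Str.upper title
  let hits := pvPatternPri.filterMap (fun pi => if PySem.Str.isIn pi.1 tu then some pi.2 else none)
  if hits.isEmpty then ""
  else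
    match PySem.List.min? hits (fun x => x) with
    | none => ""   -- unreachable: hits ≠ []
    | some m =>
      match PySem.List.pyGet? pvRulesB m with
      | none => ""  -- unreachable: m is a valid index of RULES
      | some r =>
        if r.2 == "pants" && (PySem.Str.isIn "SHORTS" tu || PySem.Str.isIn "SHORT" tu) then "shorts"
        else r.2

-- ===== PRECONDITION & SPEC =====
def Spec_verify_by_title (title : String) (out : String) : Prop := out = verify_by_title_alt title
instance (title : String) (out : String) : Decidable (Spec_verify_by_title title out) := by unfold Spec_verify_by_title; infer_instance

-- ===== CLAIM =====
def Claim_equal_verify_by_title : Prop := ∀ (title : String), Dom_verify_by_title title → Spec_verify_by_title title (verify_by_title title)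

-- ===== LEMMAS AND PROOFS =====

-- the matching priorities contributed by rules rs when numbered from n
def pvHits (tu : String) (n : Int) (rs : List (List String × String)) : List Int :=
  ((PySem.List.enumerate rs n).flatMap (fun ir => ir.2.1.map (fun p => (p, ir.1)))).filterMap
    (fun pi => if PySem.Str.isIn pi.1 tu then some pi.2 else none)

-- the first-match ladder (A's shape, over a rule table)
def pvLadder (tu : String) : List (List String × String) → String
  | [] => ""
  | r :: rs => if r.1.any (fun p => PySem.Str.isIn p tu) then r.2 else pvLadder tu rs

-- B's core (min-priority selection), with the numbering offset made explicit
def pvSel (tu : String) (n : Int) (rs : List (List String × String)) : String :=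
  let hits := pvHits tu n rs
  if hits.isEmpty then ""
  else
    match PySem.List.min? hits (fun x => x) with
    | none => ""
    | some m =>
      match PySem.List.pyGet? rs (m - n) with
      | none => ""
      | some r => r.2

def pvAdjust (tu : String) (s : String) : String :=
  if s == "pants" && (PySem.Str.isIn "SHORTS" tu || PySem.Str.isIn "SHORT" tu) then "shorts" else s

theorem pvHits_nil (tu : String) (n : Int) : pvHits tu n [] = [] := rfl

theorem pvHits_cons (tu : String) (n : Int) (r : List String × String) (rs : List (List String × String)) :
    pvHits tu n (r :: rs) =
      r.1.filterMap (fun p => if PySem.Str.isIn p tu then some n else none) ++ pvHits tu (n + 1) rs := by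
  simp only [pvHits, PySem.List.enumerate_cons, List.flatMap_cons, List.filterMap_append,
    List.filterMap_map]
  rfl

theorem pvHits_lb (tu : String) (rs : List (List String × String)) :
    ∀ (n : Int), ∀ x ∈ pvHits tu n rs, n ≤ x := by
  induction rs with
  | nil => intro n x hx; simp [pvHits_nil] at hx
  | cons r rs ih =>
    intro n x hx
    rw [pvHits_cons] at hx
    rcases List.mem_append.1 hx with h | h
    · rcases List.mem_filterMap.1 h with ⟨p, _, hp⟩
      have hnx : n = x := by
        split at hp
        · exact Option.some.inj hp
        · exact absurd hp (by simp)
      omega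
    · have := ih (n + 1) x h; omega

theorem pvSel_eq_pvLadder (tu : String) (rs : List (List String × String)) :
    ∀ (n : Int), pvSel tu n rs = pvLadder tu rs := by
  induction rs with
  | nil => intro n; simp [pvSel, pvHits_nil, pvLadder]
  | cons r rs ih =>
    intro n
    by_cases h : r.1.any (fun p => PySem.Str.isIn p tu)
    · -- group r matches: both sides give r.2
      rcases List.any_eq_true.1 h with ⟨p, hp, hin⟩
      have hnmem : n ∈ pvHits tu n (r :: rs) := by
        rw [pvHits_cons]
        exact List.mem_append.2 (Or.inl (List.mem_filterMap.2 ⟨p, hp, by rw [if_pos hin]⟩))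
      have hne : pvHits tu n (r :: rs) ≠ [] := fun hnil => by simp [hnil] at hnmem
      have hEmp : (pvHits tu n (r :: rs)).isEmpty = false := by
        cases hE : (pvHits tu n (r :: rs)).isEmpty
        · rfl
        · exact absurd (List.isEmpty_iff.1 hE) hne
      rcases hmin : PySem.List.min? (pvHits tu n (r :: rs)) (fun x => x) with _ | m
      · exact absurd ((PySem.List.min?_eq_none_iff _ _).1 hmin) hne
      · have hm_mem := PySem.List.min?_mem hmin
        have hle : m ≤ n := PySem.List.min?_isMin hmin n hnmem
        have hge : n ≤ m := pvHits_lb tu (r :: rs) n m hm_mem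
        have hmn : m = n := le_antisymm hle hge
        have hlad : pvLadder tu (r :: rs) = r.2 := by
          simp only [pvLadder]; rw [if_pos h]
        rw [hlad]
        unfold pvSel
        simp only [hEmp, Bool.false_eq_true, if_false, hmin, hmn, sub_self,
          PySem.List.pyGet?_zero_cons]
    · -- group r does not match: its contribution is empty; shift the offset
      have hfalse : ∀ p ∈ r.1, PySem.Str.isIn p tu = false := by
        intro p hp
        cases hb : PySem.Str.isIn p tu
        · rfl
        · exact absurd (List.any_eq_true.2 ⟨p, hp, hb⟩) h
      have hC : r.1.filterMap (fun p => if PySem.Str.isIn p tu then some n else none) = [] := by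
        rw [List.filterMap_eq_nil_iff]
        intro p hp
        rw [hfalse p hp]
        simp
      have hsh : pvHits tu n (r :: rs) = pvHits tu (n + 1) rs := by
        rw [pvHits_cons, hC, List.nil_append]
      have hlad : pvLadder tu (r :: rs) = pvLadder tu rs := by
        simp only [pvLadder]; rw [if_neg h]
      rw [hlad, ← ih (n + 1)]
      unfold pvSel
      rw [hsh]
      rcases hmin : PySem.List.min? (pvHits tu (n + 1) rs) (fun x => x) with _ | m
      · simp [hmin]
      · have hm_mem := PySem.List.min?_mem hmin
        have hge : n + 1 ≤ m := pvHits_lb tu rs (n + 1) m hm_mem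
        have hidx : m - n = ((m - n - 1).toNat : Int) + 1 := by omega
        have hidx2 : ((m - n - 1).toNat : Int) = m - (n + 1) := by omega
        simp only [hmin]
        rw [hidx, PySem.List.pyGet?_cons_succ, hidx2]

theorem alt_eq_adjust_sel (title : String) :
    verify_by_title_alt title = pvAdjust (PySem.Str.upper title) (pvSel (PySem.Str.upper title) 0 pvRulesB) := by
  simp only [verify_by_title_alt, pvSel, pvAdjust, pvHits, pvPatternPri, sub_zero]
  rcases hE : (((PySem.List.enumerate pvRulesB 0).flatMap (fun ir => ir.2.1.map (fun p => (p, ir.1)))).filterMap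
      (fun pi => if PySem.Str.isIn pi.1 (PySem.Str.upper title) then some pi.2 else none)).isEmpty
  · simp only [hE, Bool.false_eq_true, if_false]
    rcases hmin : PySem.List.min? (((PySem.List.enumerate pvRulesB 0).flatMap (fun ir => ir.2.1.map (fun p => (p, ir.1)))).filterMap
        (fun pi => if PySem.Str.isIn pi.1 (PySem.Str.upper title) then some pi.2 else none)) (fun x => x) with _ | m
    · simp only [hmin, show ("" == "pants") = false from by decide, Bool.false_and,
        Bool.false_eq_true, if_false]
    · simp only [hmin]
      rcases hget : PySem.List.pyGet? pvRulesB m with _ | r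
      · simp only [show ("" == "pants") = false from by decide, Bool.false_and,
          Bool.false_eq_true, if_false]
      · rfl
  · simp only [hE, if_true, show ("" == "pants") = false from by decide, Bool.false_and,
      Bool.false_eq_true, if_false]

theorem A_eq_adjust_ladder (title : String) :
    verify_by_title title = pvAdjust (PySem.Str.upper title) (pvLadder (PySem.Str.upper title) pvRulesB) := by
  unfold verify_by_title pants_A big_no_no_A
  generalize PySem.Str.upper title = tu
  simp only [pvRulesB, pvLadder, apply_ite (pvAdjust tu), List.any_cons, List.any_nil,
    Bool.or_false]
  simp only [pvAdjust,
    show ("" == "pants") = false from by decide,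
    show ("blazer" == "pants") = false from by decide,
    show ("stockings" == "pants") = false from by decide,
    show ("pants" == "pants") = true from by decide,
    show ("dress" == "pants") = false from by decide,
    show ("shirt" == "pants") = false from by decide,
    show ("suit" == "pants") = false from by decide,
    show ("sweatshirt" == "pants") = false from by decide,
    show ("sweater" == "pants") = false from by decide,
    show ("shorts" == "pants") = false from by decide,
    show ("t-shirt" == "pants") = false from by decide,
    show ("skirt" == "pants") = false from by decide,
    show ("coat" == "pants") = false from by decide,
    show ("jacket" == "pants") = false from by decide,
    show ("tights" == "pants") = false from by decide,
    show ("top" == "pants") = false from by decide,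
    show ("jeans" == "pants") = false from by decide,
    Bool.false_and, Bool.true_and, Bool.false_eq_true, if_false]

-- ===== VERDICT =====
theorem verify_by_title_spec : Claim_equal_verify_by_title := by
  intro title _
  unfold Spec_verify_by_title
  rw [alt_eq_adjust_sel, pvSel_eq_pvLadder, A_eq_adjust_ladder]
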